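-- pv_equiv track=rewrite | github.com/1156054203/astair | astair/visualiser_multi_under_dev.py | quartile_finder
-- ===== SOURCE A (Python) =====
-- def quartile_finder(input_bedy, known_var):
--     coef = 0
--     for x in input_bedy:
--         if coef < known_var:
--             coef += x
--         elif coef >= known_var:
--             unknown_index = input_bedy.index(x) - 1
--             return unknown_index
-- ===== SOURCE B (Python) =====
-- def quartile_finder(input_bedy, known_var):
--     # Two passes: build the exclusive prefix sums, then return the position
--     # just before the first one that reaches the threshold.
--     total = 0
--     prefixes = []
--     for x in input_bedy:
--         prefixes.append(total)
--         total += x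
--     for i, p in enumerate(prefixes):
--         if p >= known_var:
--             return i - 1
--     return None
-- ===== Notes on version B (the rewrite author's own statement) =====
-- stated objective: alternative
-- what changed: Replaces A's single check-before-add accumulator loop (which re-finds the hit element with .index) by two passes: build the exclusive prefix-sum list, then return position-before-first-hit directly from the scan index.
-- intended difference: On inputs where the first index i whose exclusive prefix sum reaches known_var holds a value that already occurred earlier in the list, A's .index lookup returns first_occurrence-1 (e.g. -1 on ([5,5],5)) instead of the position before the hit; B returns the intended i-1 (0 there). — e.g. on quartile_finder([5, 5], 5): A returns some (-1), B returns some 0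
import Mathlib
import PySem

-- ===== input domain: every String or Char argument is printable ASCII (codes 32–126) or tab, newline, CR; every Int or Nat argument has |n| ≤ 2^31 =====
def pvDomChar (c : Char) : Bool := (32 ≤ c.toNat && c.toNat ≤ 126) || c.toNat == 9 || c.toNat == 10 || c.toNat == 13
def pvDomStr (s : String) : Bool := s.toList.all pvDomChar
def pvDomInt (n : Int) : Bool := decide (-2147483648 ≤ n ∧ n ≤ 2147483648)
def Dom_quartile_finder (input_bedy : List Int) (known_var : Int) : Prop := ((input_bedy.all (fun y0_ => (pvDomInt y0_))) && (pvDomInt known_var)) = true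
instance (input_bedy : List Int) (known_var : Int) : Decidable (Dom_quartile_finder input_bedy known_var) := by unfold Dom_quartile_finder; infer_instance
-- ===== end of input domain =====

-- B replaces A's single check-before-add loop (which re-finds the hit element with .index)
-- by two passes — build the exclusive prefix sums, then return position-before-first-hit —
-- and intentionally returns hit-1 where A's .index lookup returns the wrong position on
-- duplicate values (objective: alternative; D_ below states the difference).

-- ===== PORT A =====
-- A's for-loop with the running `coef`; the dead third branch mirrors Python's
-- fall-through when neither `if` nor `elif` fires (unreachable by trichotomy).
def qfLoopA (orig : List Int) (known_var : Int) : List Int → Int → Option Int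
  | [], _ => none
  | x :: xs, coef =>
    if coef < known_var then qfLoopA orig known_var xs (coef + x)
    else if known_var ≤ coef then (PySem.List.index? orig x).map (fun j => (j : Int) - 1)
    else qfLoopA orig known_var xs coef

def quartile_finder (input_bedy : List Int) (known_var : Int) : Option Int :=
  qfLoopA input_bedy known_var input_bedy 0

-- ===== PORT B =====
-- first loop of Source B: append the running total before adding each element
def qfPrefixes (total : Int) : List Int → List Int
  | [] => []
  | x :: xs => total :: qfPrefixes (total + x) xs

-- second loop of Source B: `for i, p in enumerate(prefixes)` — the counter is the enumeration
def qfFind (known_var : Int) : List Int → Nat → Option Int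
  | [], _ => none
  | p :: ps, i => if known_var ≤ p then some ((i : Int) - 1) else qfFind known_var ps (i + 1)

def quartile_finder_alt (input_bedy : List Int) (known_var : Int) : Option Int :=
  qfFind known_var (qfPrefixes 0 input_bedy) 0

-- ===== PRECONDITION & SPEC =====
-- On inputs whose first index i with sum(input_bedy[:i]) >= known_var carries a value that
-- already occurred earlier, A's `.index` lookup returns first_occurrence-1 instead of i-1;
-- B returns the intended i-1.
def D_quartile_finder (input_bedy : List Int) (known_var : Int) : Prop :=
  ∃ i ∈ List.range input_bedy.length, known_var ≤ (input_bedy.take i).sum ∧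
    (∀ j ∈ List.range i, (input_bedy.take j).sum < known_var) ∧
    input_bedy.getD i 0 ∈ input_bedy.take i
instance (input_bedy : List Int) (known_var : Int) : Decidable (D_quartile_finder input_bedy known_var) := by
  unfold D_quartile_finder; infer_instance

def Spec_quartile_finder (input_bedy : List Int) (known_var : Int) (out : Option Int) : Prop := ¬ D_quartile_finder input_bedy known_var → out = quartile_finder_alt input_bedy known_var
instance (input_bedy : List Int) (known_var : Int) (out : Option Int) : Decidable (Spec_quartile_finder input_bedy known_var out) := by unfold Spec_quartile_finder; infer_instance

def pvDiffWitness_quartile_finder : List Int × Int := ([5, 5], 5)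
def pvDiffWitnessOut_quartile_finder : (Option Int) × (Option Int) := (some (-1), some 0)

-- ===== CLAIM (what is proved, stated in full; the proofs are below) =====
def Claim_unchanged_quartile_finder : Prop := ∀ (input_bedy : List Int) (known_var : Int), Dom_quartile_finder input_bedy known_var → Spec_quartile_finder input_bedy known_var (quartile_finder input_bedy known_var)
def Claim_changed_quartile_finder : Prop := Dom_quartile_finder (pvDiffWitness_quartile_finder.1) (pvDiffWitness_quartile_finder.2) ∧ D_quartile_finder (pvDiffWitness_quartile_finder.1) (pvDiffWitness_quartile_finder.2) ∧ quartile_finder (pvDiffWitness_quartile_finder.1) (pvDiffWitness_quartile_finder.2) = pvDiffWitnessOut_quartile_finder.1 ∧ quartile_finder_alt (pvDiffWitness_quartile_finder.1) (pvDiffWitness_quartile_finder.2) = pvDiffWitnessOut_quartile_finder.2 ∧ pvDiffWitnessOut_quartile_finder.1 ≠ pvDiffWitnessOut_quartile_finder.2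
def Claim_exact_quartile_finder : Prop := ∀ (input_bedy : List Int) (known_var : Int), Dom_quartile_finder input_bedy known_var → D_quartile_finder input_bedy known_var → quartile_finder input_bedy known_var ≠ quartile_finder_alt input_bedy known_var

-- ===== LEMMAS AND PROOFS =====

-- proof-only abstraction: the first index whose exclusive prefix sum reaches the threshold
def qfHit (known_var : Int) : List Int → Int → Option Nat
  | [], _ => none
  | x :: xs, coef => if known_var ≤ coef then some 0 else (qfHit known_var xs (coef + x)).map (· + 1)

theorem qfLoopA_eq_hit (orig : List Int) (k : Int) :
    ∀ (rest : List Int) (c : Int),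
      qfLoopA orig k rest c
        = (qfHit k rest c).bind
            (fun i => (PySem.List.index? orig (rest.getD i 0)).map (fun j => (j : Int) - 1)) := by
  intro rest
  induction rest with
  | nil => intro c; simp [qfLoopA, qfHit]
  | cons x xs ih =>
    intro c
    by_cases h : c < k
    · rw [qfLoopA, if_pos h, qfHit, if_neg (not_le.mpr h), ih]
      cases qfHit k xs (c + x) <;> simp [List.getD]
    · rw [qfLoopA, if_neg h, if_pos (not_lt.mp h), qfHit, if_pos (not_lt.mp h)]
      simp [List.getD]

theorem qfFind_eq_hit (k : Int) :
    ∀ (l : List Int) (c : Int) (n : Nat),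
      qfFind k (qfPrefixes c l) n = (qfHit k l c).map (fun i => ((n + i : Nat) : Int) - 1) := by
  intro l
  induction l with
  | nil => intro c n; simp [qfPrefixes, qfFind, qfHit]
  | cons x xs ih =>
    intro c n
    by_cases h : k ≤ c
    · simp [qfPrefixes, qfFind, qfHit, h]
    · rw [qfPrefixes, qfFind, if_neg h, qfHit, if_neg h, ih]
      cases qfHit k xs (c + x) with
      | none => simp
      | some i =>
        simp only [Option.map_some]
        congr 2
        omega

theorem qfHit_props (k : Int) :
    ∀ (l : List Int) (c : Int) (i : Nat), qfHit k l c = some i →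
      i < l.length ∧ k ≤ c + (l.take i).sum ∧ (∀ j, j < i → c + (l.take j).sum < k) := by
  intro l
  induction l with
  | nil => intro c i h; simp [qfHit] at h
  | cons x xs ih =>
    intro c i h
    rw [qfHit] at h
    by_cases hc : k ≤ c
    · rw [if_pos hc] at h
      simp at h
      subst h
      refine ⟨by simp, by simpa using hc, by omega⟩
    · rw [if_neg hc] at h
      cases hx : qfHit k xs (c + x) with
      | none => rw [hx] at h; simp at h
      | some i' =>
        rw [hx] at h; simp at h
        obtain ⟨h1, h2, h3⟩ := ih (c + x) i' hx
        subst h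
        refine ⟨by simpa using h1, ?_, ?_⟩
        · simpa [add_assoc] using h2
        · intro j hj
          cases j with
          | zero => simpa using not_le.mp hc
          | succ j' => simpa [add_assoc] using h3 j' (by omega)

theorem qfHit_none (k : Int) :
    ∀ (l : List Int) (c : Int), qfHit k l c = none →
      ∀ i, i < l.length → c + (l.take i).sum < k := by
  intro l
  induction l with
  | nil => intro c _ i hi; simp at hi
  | cons x xs ih =>
    intro c h i hi
    rw [qfHit] at h
    by_cases hc : k ≤ c
    · rw [if_pos hc] at h; simp at h
    · rw [if_neg hc] at h
      simp only [Option.map_eq_none_iff] at h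
      cases i with
      | zero => simpa using not_le.mp hc
      | succ i' => simpa [add_assoc] using ih (c + x) h i' (by simpa using hi)

-- l splits at i when l.getD i 0 does not occur before i
theorem index?_at (l : List Int) (i : Nat) (hi : i < l.length)
    (hmem : l.getD i 0 ∉ l.take i) :
    PySem.List.index? l (l.getD i 0) = some i := by
  rw [PySem.List.index?_eq_some_iff]
  refine ⟨l.take i, l.drop (i + 1), ?_, by simp [hi.le], hmem⟩
  have hg : l.getD i 0 = l[i] := by simp [List.getD, hi]
  rw [hg]
  rw [List.getElem_cons_drop, List.take_append_drop]

theorem index?_lt (l : List Int) (i : Nat) (_hi : i < l.length)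
    (hmem : l.getD i 0 ∈ l.take i) :
    ∃ j, PySem.List.index? l (l.getD i 0) = some j ∧ j < i := by
  have hml : l.getD i 0 ∈ l := List.mem_of_mem_take hmem
  obtain ⟨j, hj⟩ := Option.isSome_iff_exists.mp ((PySem.List.index?_isSome_iff l _).mpr hml)
  refine ⟨j, hj, ?_⟩
  obtain ⟨hjl, hgj, hfirst⟩ := PySem.List.getElem_of_index?_eq_some hj
  by_contra hge
  obtain ⟨j', hj', hgj'⟩ := List.mem_take_iff_getElem.mp hmem
  have hj'i : j' < i := (lt_min_iff.mp hj').1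
  exact hfirst j' (by omega) hgj'

-- qfHit is exactly the minimal index of D_'s description
theorem qfHit_of_D (l : List Int) (k : Int) (i : Nat)
    (hlen : i < l.length) (hge : k ≤ (l.take i).sum)
    (hmin : ∀ j, j < i → (l.take j).sum < k) :
    qfHit k l 0 = some i := by
  cases hh : qfHit k l 0 with
  | none =>
    have := qfHit_none k l 0 hh i hlen
    simp at this; omega
  | some i' =>
    obtain ⟨h1, h2, h3⟩ := qfHit_props k l 0 i' hh
    simp only [zero_add] at h2 h3
    rcases lt_trichotomy i i' with h | h | h
    · exact absurd hge (not_le.mpr (h3 i h))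
    · rw [h]
    · exact absurd h2 (not_le.mpr (hmin i' h))

-- ===== VERDICT (by name: the statement is the Claim_ definition above) =====
theorem quartile_finder_spec : Claim_unchanged_quartile_finder := by
  intro l k _ hnd
  show quartile_finder l k = quartile_finder_alt l k
  rw [quartile_finder, quartile_finder_alt, qfLoopA_eq_hit, qfFind_eq_hit]
  cases hh : qfHit k l 0 with
  | none => simp
  | some i =>
    obtain ⟨h1, h2, h3⟩ := qfHit_props k l 0 i hh
    simp only [zero_add] at h2 h3
    have hmem : l.getD i 0 ∉ l.take i := fun hm =>
      hnd ⟨i, List.mem_range.mpr h1, h2, fun j hj => h3 j (List.mem_range.mp hj), hm⟩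
    have hidx := index?_at l i h1 hmem
    simp only [PySem.List.index?_eq_idxOf?, List.getD_eq_getElem?_getD] at hidx
    simp [hidx]

theorem quartile_finder_changed : Claim_changed_quartile_finder := by
  unfold Claim_changed_quartile_finder; decide

theorem quartile_finder_tight : Claim_exact_quartile_finder := by
  intro l k _ hd
  obtain ⟨i, h1, h2, h3, hm⟩ := hd
  have h1' := List.mem_range.mp h1
  have hh := qfHit_of_D l k i h1' h2 (fun j hj => h3 j (List.mem_range.mpr hj))
  rw [quartile_finder, quartile_finder_alt, qfLoopA_eq_hit, qfFind_eq_hit, hh]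
  obtain ⟨j, hj, hji⟩ := index?_lt l i h1' hm
  simp only [PySem.List.index?_eq_idxOf?, List.getD_eq_getElem?_getD] at hj
  simp [hj]
  omega
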